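-- pv_equiv track=rewrite | github.com/mahfuz0712/BornomalaScript-Programming-Language | src/bs.py | is_assignment
-- ===== SOURCE A (Python) =====
-- reserved_words = {"jodi", "othoba", "nahole", "jokhon", "dhoro", "lekho", "kaj", "ferotDao"}
--
-- def is_assignment(line: str) -> bool:
--     """
--     Detect a = not inside quotes and not starting with reserved keyword.
--     """
--     if any(line.startswith(k) for k in reserved_words):
--         return False
--     in_string = False
--     quote = None
--     for ch in line:
--         if ch in ('"', "'"):
--             if not in_string:
--                 in_string = True
--                 quote = ch
--             elif quote == ch:
--                 in_string = False
--                 quote = None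
--         elif ch == "=" and not in_string:
--             return True
--     return False
-- ===== SOURCE B (Python) =====
-- import re
--
-- reserved_words = {"jodi", "othoba", "nahole", "jokhon", "dhoro", "lekho", "kaj", "ferotDao"}
--
-- _QUOTED = re.compile(r'"[^"]*"?|\'[^\']*\'?')
--
-- def is_assignment(line: str) -> bool:
--     if any(line.startswith(k) for k in reserved_words):
--         return False
--     return "=" in _QUOTED.sub("", line)
-- ===== Notes on version B (the rewrite author's own statement) =====
-- stated objective: faster
-- what changed: Replaces the explicit per-character in_string/quote state machine with a single regex substitution that strips every quoted region (an unterminated quote swallowing the rest of the line) followed by a plain substring membership test.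
import Mathlib
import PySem

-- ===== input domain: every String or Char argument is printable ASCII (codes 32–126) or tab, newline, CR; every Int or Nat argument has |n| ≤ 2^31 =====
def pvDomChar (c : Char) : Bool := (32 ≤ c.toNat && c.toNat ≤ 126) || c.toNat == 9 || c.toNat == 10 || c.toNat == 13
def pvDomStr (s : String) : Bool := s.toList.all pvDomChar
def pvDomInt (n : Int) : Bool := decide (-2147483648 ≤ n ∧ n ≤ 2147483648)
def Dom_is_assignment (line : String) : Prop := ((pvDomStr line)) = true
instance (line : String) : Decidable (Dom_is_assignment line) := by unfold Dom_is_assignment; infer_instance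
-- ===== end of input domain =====

-- B strips every quoted region with one regex substitution instead of A's per-character
-- quote-state loop, then tests membership (faster in a timing run, constant factor).

-- ===== PORT A =====
def reservedWords : List String :=
  ["jodi", "othoba", "nahole", "jokhon", "dhoro", "lekho", "kaj", "ferotDao"]

-- the for-loop with early return: recursion over the characters with state (in_string, quote)
def isAssignLoop : List Char → Bool → Option Char → Bool
  | [], _, _ => false
  | ch :: rest, in_string, quote =>
    if ch = '"' ∨ ch = '\'' then
      if !in_string then isAssignLoop rest true (some ch)
      else if quote = some ch then isAssignLoop rest false none
      else isAssignLoop rest in_string quote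
    else if ch = '=' ∧ !in_string then true
    else isAssignLoop rest in_string quote

def is_assignment (line : String) : Bool :=
  if reservedWords.any (fun k => PySem.Str.startswith line k) then false
  else isAssignLoop line.toList false none

-- ===== PORT B =====
-- re.sub(r'"[^"]*"?|\'[^\']*\'?', '', line): left-to-right, a match starts only at a
-- quote char, runs to the matching quote (consumed if present) or to end of line.
def stripQuoted : List Char → List Char
  | [] => []
  | c :: rest =>
    if c = '"' ∨ c = '\'' then
      stripQuoted ((rest.dropWhile (· ≠ c)).drop 1)
    else
      c :: stripQuoted rest
termination_by l => l.length
decreasing_by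
  · have h1 := List.length_dropWhile_le (fun x => x ≠ c) rest
    simp only [List.length_drop, List.length_cons] at *
    omega
  · simp

def is_assignment_alt (line : String) : Bool :=
  if reservedWords.any (fun k => PySem.Str.startswith line k) then false
  else (stripQuoted line.toList).contains '='

-- ===== PRECONDITION & SPEC =====
def Spec_is_assignment (line : String) (out : Bool) : Prop := out = is_assignment_alt line
instance (line : String) (out : Bool) : Decidable (Spec_is_assignment line out) := by unfold Spec_is_assignment; infer_instance

-- ===== CLAIM (what is proved, stated in full; the proofs are below) =====
def Claim_equal_is_assignment : Prop := ∀ (line : String), Dom_is_assignment line → Spec_is_assignment line (is_assignment line)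

-- ===== LEMMAS AND PROOFS =====

-- inside a string with open quote q, the loop skips every character up to and including
-- the closing q, then resumes outside a string
theorem isAssignLoop_in_string (q : Char) (hq : q = '"' ∨ q = '\'') :
    ∀ (chars : List Char),
      isAssignLoop chars true (some q) =
        isAssignLoop ((chars.dropWhile (· ≠ q)).drop 1) false none := by
  intro chars
  induction chars with
  | nil => simp [isAssignLoop]
  | cons c rest ih =>
    by_cases hcq : c = q
    · subst hcq
      simp [isAssignLoop, hq, List.dropWhile]
    · have hdw : (c :: rest).dropWhile (· ≠ q) = rest.dropWhile (· ≠ q) := by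
        simp [List.dropWhile, hcq]
      rw [hdw]
      by_cases hquote : c = '"' ∨ c = '\''
      · have hstep : isAssignLoop (c :: rest) true (some q) = isAssignLoop rest true (some q) := by
          simp [isAssignLoop, hquote, (Ne.symm hcq : q ≠ c)]
        rw [hstep, ih]
      · have hstep : isAssignLoop (c :: rest) true (some q) = isAssignLoop rest true (some q) := by
          simp [isAssignLoop, hquote]
        rw [hstep, ih]

-- the state machine started outside a string finds '=' iff the stripped line contains '='
theorem isAssignLoop_eq_strip : ∀ (chars : List Char),
    isAssignLoop chars false none = (stripQuoted chars).contains '=' := by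
  intro chars
  induction hn : chars.length using Nat.strong_induction_on generalizing chars with
  | _ n ih =>
    match chars with
    | [] => simp [isAssignLoop, stripQuoted]
    | c :: rest =>
      by_cases hquote : c = '"' ∨ c = '\''
      · have hlen : ((rest.dropWhile (· ≠ c)).drop 1).length < n := by
          have h1 : (rest.dropWhile (· ≠ c)).length ≤ rest.length := List.length_dropWhile_le _ _
          have h1 := List.length_dropWhile_le (fun x => x ≠ c) rest
          simp only [List.length_drop, List.length_cons] at *
          omega
        have h3 := ih _ hlen ((rest.dropWhile (· ≠ c)).drop 1) rfl
        simp only [List.drop_one, ne_eq, decide_not] at h3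
        simp [isAssignLoop, stripQuoted, hquote, isAssignLoop_in_string c hquote, h3]
      · have hlen : rest.length < n := by simp at hn; omega
        have := ih _ hlen rest rfl
        by_cases heq : c = '='
        · subst heq; simp [isAssignLoop, stripQuoted]
        · simp [isAssignLoop, stripQuoted, hquote, heq, (Ne.symm heq : '=' ≠ c), this]

-- ===== VERDICT (by name: the statement is the Claim_ definition above) =====
theorem is_assignment_spec : Claim_equal_is_assignment := by
  intro line _
  unfold Spec_is_assignment is_assignment is_assignment_alt
  rw [isAssignLoop_eq_strip]
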